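-- pv_equiv track=rewrite | github.com/SAP-samples/sap-btp-ai-best-practices | use-cases/intelligent-negotiation-assistant-procurement/api/app/core/kg_creation/image_kg_pipeline.py | _fix_tqdcs_categories
-- ===== SOURCE A (Python) =====
-- from typing import Dict, Any, Optional
--
-- def _fix_tqdcs_categories(categories: Any) -> list:
--     """Fix TQDCS categories to ensure they are single letters."""
--     if not isinstance(categories, list):
--         return []
--
--     fixed = []
--     category_map = {
--         'technology': 'T', 'tech': 'T', 't': 'T',
--         'quality': 'Q', 'qual': 'Q', 'q': 'Q',
--         'delivery': 'D', 'del': 'D', 'd': 'D',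
--         'cost': 'C', 'price': 'C', 'c': 'C',
--         'sustainability': 'S', 'sustain': 'S', 's': 'S'
--     }
--
--     for cat in categories:
--         if isinstance(cat, str):
--             cat_lower = cat.lower().strip()
--             if cat_lower in ['t', 'q', 'd', 'c', 's']:
--                 fixed.append(cat_lower.upper())
--             elif cat_lower in category_map:
--                 fixed.append(category_map[cat_lower])
--
--     return sorted(list(set(fixed)))
-- ===== SOURCE B (Python) =====
-- def _fix_tqdcs_categories(categories):
--     """Fix TQDCS categories to ensure they are single letters."""
--     if not isinstance(categories, list):
--         return []
--
--     category_map = {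
--         'technology': 'T', 'tech': 'T', 't': 'T',
--         'quality': 'Q', 'qual': 'Q', 'q': 'Q',
--         'delivery': 'D', 'del': 'D', 'd': 'D',
--         'cost': 'C', 'price': 'C', 'c': 'C',
--         'sustainability': 'S', 'sustain': 'S', 's': 'S'
--     }
--
--     present = set()
--     for cat in categories:
--         if isinstance(cat, str):
--             code = category_map.get(cat.lower().strip())
--             if code is not None:
--                 present.add(code)
--
--     return [c for c in 'CDQST' if c in present]
-- ===== Notes on version B (the rewrite author's own statement) =====
-- stated objective: simpler
-- what changed: B drops A's redundant single-letter branch (the map already contains the five letters), collects codes in a set instead of a list, and replaces sorted(list(set(fixed))) by enumerating the fixed alphabetical code universe 'CDQST' and keeping the present ones.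
import Mathlib
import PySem

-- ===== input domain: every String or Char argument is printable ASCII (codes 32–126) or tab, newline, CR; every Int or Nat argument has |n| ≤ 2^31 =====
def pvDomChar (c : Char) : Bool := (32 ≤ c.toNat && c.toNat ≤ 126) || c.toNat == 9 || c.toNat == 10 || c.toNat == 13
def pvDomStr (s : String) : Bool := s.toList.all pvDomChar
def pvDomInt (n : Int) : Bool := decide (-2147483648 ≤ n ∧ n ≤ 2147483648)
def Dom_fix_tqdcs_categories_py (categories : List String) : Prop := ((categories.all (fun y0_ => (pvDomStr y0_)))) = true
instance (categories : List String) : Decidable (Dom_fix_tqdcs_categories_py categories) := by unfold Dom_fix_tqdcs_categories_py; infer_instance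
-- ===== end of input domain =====

-- B simplifies A: the separate single-letter branch is redundant (the map contains the five
-- letters), codes are collected in a set, and sorted(list(set(fixed))) becomes a fixed-order
-- scan of the alphabetical code universe "CDQST".

-- ===== PORT A =====
-- the dict literal category_map (distinct keys, insertion order)
def pvCategoryMap : PySem.Dict String String := PySem.Dict.mk
  [("technology", "T"), ("tech", "T"), ("t", "T"),
   ("quality", "Q"), ("qual", "Q"), ("q", "Q"),
   ("delivery", "D"), ("del", "D"), ("d", "D"),
   ("cost", "C"), ("price", "C"), ("c", "C"),
   ("sustainability", "S"), ("sustain", "S"), ("s", "S")]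

-- one iteration of A's loop body (categories : List String, so isinstance(cat, str) is true)
def pvFixAStep (fixed : List String) (cat : String) : List String :=
  if PySem.Str.strip (PySem.Str.lower cat) ∈ ["t", "q", "d", "c", "s"] then
    fixed ++ [PySem.Str.upper (PySem.Str.strip (PySem.Str.lower cat))]
  else if (pvCategoryMap.get? (PySem.Str.strip (PySem.Str.lower cat))).isSome then
    -- category_map[cat_lower]; guarded by the isSome test, the default "" is never used
    fixed ++ [(pvCategoryMap.get? (PySem.Str.strip (PySem.Str.lower cat))).getD ""]
  else fixed

-- isinstance(categories, list) is always true under the typed signature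
def fix_tqdcs_categories_py (categories : List String) : List String :=
  PySem.List.sorted (PySem.Set.ofList (categories.foldl pvFixAStep [])) (fun x => x) false

-- ===== PORT B =====
def pvFixBStep (present : PySem.Set String) (cat : String) : PySem.Set String :=
  match pvCategoryMap.get? (PySem.Str.strip (PySem.Str.lower cat)) with
  | some code => PySem.Set.add present code
  | none => present

def fix_tqdcs_categories_py_alt (categories : List String) : List String :=
  let present := categories.foldl pvFixBStep PySem.Set.empty
  ["C", "D", "Q", "S", "T"].filter (fun c => PySem.Set.contains present c)

-- ===== PRECONDITION & SPEC =====
def Spec_fix_tqdcs_categories_py (categories : List String) (out : List String) : Prop := out = fix_tqdcs_categories_py_alt categories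
instance (categories : List String) (out : List String) : Decidable (Spec_fix_tqdcs_categories_py categories out) := by unfold Spec_fix_tqdcs_categories_py; infer_instance

-- ===== CLAIM (what is proved, stated in full; the proofs are below) =====
def Claim_equal_fix_tqdcs_categories_py : Prop := ∀ (categories : List String), Dom_fix_tqdcs_categories_py categories → Spec_fix_tqdcs_categories_py categories (fix_tqdcs_categories_py categories)

-- ===== LEMMAS AND PROOFS =====

-- the code appended for one input string (none = nothing appended)
def pvCode? (cat : String) : Option String :=
  pvCategoryMap.get? (PySem.Str.strip (PySem.Str.lower cat))

-- A's single-letter branch agrees with the map lookup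
lemma pvFixAStep_eq (fixed : List String) (cat : String) :
    pvFixAStep fixed cat = fixed ++ (pvCode? cat).toList := by
  unfold pvFixAStep pvCode?
  generalize PySem.Str.strip (PySem.Str.lower cat) = k
  by_cases h : k ∈ (["t", "q", "d", "c", "s"] : List String)
  · rw [if_pos h]
    have hmap : pvCategoryMap.get? k = some (PySem.Str.upper k) := by
      fin_cases h <;> decide
    simp [hmap]
  · rw [if_neg h]
    cases hg : pvCategoryMap.get? k <;> simp

lemma pvFoldA (categories : List String) (acc : List String) :
    categories.foldl pvFixAStep acc = acc ++ categories.flatMap (fun c => (pvCode? c).toList) := by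
  induction categories generalizing acc with
  | nil => simp
  | cons x xs ih => simp [List.foldl_cons, pvFixAStep_eq, ih, List.flatMap_cons]

lemma pvFoldB (categories : List String) (s : PySem.Set String) :
    categories.foldl pvFixBStep s
      = (categories.flatMap (fun c => (pvCode? c).toList)).foldl PySem.Set.add s := by
  induction categories generalizing s with
  | nil => simp
  | cons x xs ih =>
    simp only [List.foldl_cons, List.flatMap_cons, List.foldl_append]
    have : pvFixBStep s x = ((pvCode? x).toList).foldl PySem.Set.add s := by
      unfold pvFixBStep pvCode?
      cases pvCategoryMap.get? (PySem.Str.strip (PySem.Str.lower x)) <;> simp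
    rw [this, ih]

-- every value the map can return is one of the five codes
lemma pvCode?_mem (cat : String) (v : String) (h : pvCode? cat = some v) :
    v ∈ (["C", "D", "Q", "S", "T"] : List String) := by
  unfold pvCode? at h
  have hm := PySem.Dict.mem_items_of_get?_eq_some _ h
  simp only [pvCategoryMap, List.mem_cons, List.not_mem_nil, or_false,
    Prod.mk.injEq] at hm
  rcases hm with ⟨-, rfl⟩ | ⟨-, rfl⟩ | ⟨-, rfl⟩ | ⟨-, rfl⟩ | ⟨-, rfl⟩ | ⟨-, rfl⟩ | ⟨-, rfl⟩ |
    ⟨-, rfl⟩ | ⟨-, rfl⟩ | ⟨-, rfl⟩ | ⟨-, rfl⟩ | ⟨-, rfl⟩ | ⟨-, rfl⟩ | ⟨-, rfl⟩ | ⟨-, rfl⟩ <;> decide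

-- sorted(set(L)) for L drawn from the five codes is the fixed-order filter
lemma pvSortedSet (L : List String) (hL : ∀ x ∈ L, x ∈ (["C", "D", "Q", "S", "T"] : List String)) :
    PySem.List.sorted (PySem.Set.ofList L) (fun x => x) false
      = (["C", "D", "Q", "S", "T"] : List String).filter
          (fun c => PySem.Set.contains (PySem.Set.ofList L) c) := by
  apply PySem.List.sorted_eq_of_perm_of_pairwise_lt
  · apply (List.perm_ext_iff_of_nodup ?_ (PySem.Set.nodup_ofList L)).mpr
    · intro a
      simp only [List.mem_filter, PySem.Set.mem_ofList, PySem.Set.contains]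
      constructor
      · rintro ⟨_, h⟩
        simpa [PySem.Set.mem_ofList] using h
      · intro h
        exact ⟨hL a (by simpa [PySem.Set.mem_ofList] using h),
               by simpa [PySem.Set.mem_ofList] using h⟩
    · exact List.Nodup.filter _ (by decide)
  · exact List.Pairwise.filter _ (by simp [String.lt_iff_toList_lt]; decide)

-- ===== VERDICT (by name: the statement is the Claim_ definition above) =====
theorem fix_tqdcs_categories_py_spec : Claim_equal_fix_tqdcs_categories_py := by
  intro categories _
  unfold Spec_fix_tqdcs_categories_py fix_tqdcs_categories_py fix_tqdcs_categories_py_alt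
  rw [pvFoldA, pvFoldB, List.nil_append]
  have hofList : (categories.flatMap (fun c => (pvCode? c).toList)).foldl PySem.Set.add PySem.Set.empty
      = PySem.Set.ofList (categories.flatMap (fun c => (pvCode? c).toList)) :=
    (PySem.Set.ofList_eq_foldl _).symm
  rw [hofList]
  apply pvSortedSet
  intro x hx
  simp only [List.mem_flatMap, Option.mem_toList] at hx
  obtain ⟨c, _, hc⟩ := hx
  exact pvCode?_mem c x (by simpa using hc)
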